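-- pv_equiv track=rewrite | github.com/andypaypow/educalims-django-hostinger | gosen/views/alternance.py | calculate_alternances
-- ===== SOURCE A (Python) =====
-- def calculate_alternances(combination, source_array):
--     """Calcule le nombre d'alternances"""
--     if not source_array:
--         return 0
--
--     combi_set = set(str(h) for h in combination)
--     alternances = 0
--
--     for i in range(len(source_array) - 1):
--         current_in = source_array[i] in combi_set
--         next_in = source_array[i + 1] in combi_set
--         if current_in != next_in:
--             alternances += 1
--
--     return alternances
-- ===== SOURCE B (Python) =====
-- def calculate_alternances(combination, source_array):
--     """Calcule le nombre d'alternances"""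
--     combi_set = {str(h) for h in combination}
--     # compress the membership sequence into its maximal runs; alternances = runs - 1
--     runs = []
--     for s in source_array:
--         k = s in combi_set
--         if not runs or runs[-1] != k:
--             runs.append(k)
--     return max(len(runs) - 1, 0)
-- ===== Notes on version B (the rewrite author's own statement) =====
-- stated objective: alternative
-- what changed: Instead of indexing adjacent pairs with range(len-1), B compresses the membership sequence into a list of maximal run representatives and returns max(len(runs)-1, 0), which also removes the empty-list guard.
import Mathlib
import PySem

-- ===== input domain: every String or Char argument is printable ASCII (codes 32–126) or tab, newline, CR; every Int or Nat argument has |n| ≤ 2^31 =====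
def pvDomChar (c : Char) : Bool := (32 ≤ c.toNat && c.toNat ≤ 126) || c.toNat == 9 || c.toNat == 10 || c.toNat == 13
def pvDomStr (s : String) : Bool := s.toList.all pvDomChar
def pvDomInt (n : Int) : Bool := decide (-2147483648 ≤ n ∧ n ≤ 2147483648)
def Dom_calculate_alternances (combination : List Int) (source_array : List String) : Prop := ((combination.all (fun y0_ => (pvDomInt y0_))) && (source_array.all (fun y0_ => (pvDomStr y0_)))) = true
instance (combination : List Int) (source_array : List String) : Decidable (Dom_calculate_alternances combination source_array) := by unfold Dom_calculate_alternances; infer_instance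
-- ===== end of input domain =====

-- B replaces the indexed adjacent-pair loop by compressing the membership sequence into
-- maximal-run representatives and returning max(runs-1, 0) (alternative decomposition, same cost).


-- ===== PORT A =====
def calculate_alternances (combination : List Int) (source_array : List String) : Int :=
  if source_array = [] then 0
  else
    let combi_set : PySem.Set String := PySem.Set.ofList (combination.map PySem.Int.toStr)
    (PySem.List.pyRange 0 ((source_array.length : Int) - 1) 1).foldl
      (fun alternances i =>
        let current_in := PySem.Set.contains combi_set (PySem.List.pyGetD source_array i "")
        let next_in := PySem.Set.contains combi_set (PySem.List.pyGetD source_array (i + 1) "")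
        if current_in ≠ next_in then alternances + 1 else alternances) 0

-- ===== PORT B =====
def calculate_alternances_alt (combination : List Int) (source_array : List String) : Int :=
  let combi_set : PySem.Set String := PySem.Set.ofList (combination.map PySem.Int.toStr)
  let runs : List Bool := source_array.foldl
    (fun runs s =>
      let k := PySem.Set.contains combi_set s
      if runs.isEmpty || (PySem.List.pyGetD runs (-1) false != k) then runs ++ [k] else runs)
    []
  max ((runs.length : Int) - 1) 0

-- ===== PRECONDITION & SPEC =====
def Spec_calculate_alternances (combination : List Int) (source_array : List String) (out : Int) : Prop := out = calculate_alternances_alt combination source_array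
instance (combination : List Int) (source_array : List String) (out : Int) : Decidable (Spec_calculate_alternances combination source_array out) := by unfold Spec_calculate_alternances; infer_instance

-- ===== CLAIM (what is proved, stated in full; the proofs are below) =====
def Claim_equal_calculate_alternances : Prop := ∀ (combination : List Int) (source_array : List String), Dom_calculate_alternances combination source_array → Spec_calculate_alternances combination source_array (calculate_alternances combination source_array)

-- ===== LEMMAS AND PROOFS =====

/-- number of adjacent unequal pairs in a boolean sequence -/
def altCount : List Bool → Int
  | a :: b :: t => (if a ≠ b then 1 else 0) + altCount (b :: t)
  | _ => 0

theorem altCount_nonneg : ∀ ks : List Bool, 0 ≤ altCount ks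
  | [] => le_refl 0
  | [_] => le_refl 0
  | a :: b :: t => by
      have := altCount_nonneg (b :: t)
      simp only [altCount]; split_ifs <;> omega

/-- indicator-sum over the index range computes altCount of the membership sequence -/
theorem sumInd_eq (k : String → Bool) :
    ∀ (L : List String),
      ((PySem.List.pyRange 0 ((L.length : Int) - 1) 1).map
        (fun i => if k (PySem.List.pyGetD L i "") ≠ k (PySem.List.pyGetD L (i + 1) "") then (1 : Int) else 0)).sum
      = altCount (L.map k) := by
  intro L
  induction L with
  | nil => simp [altCount, PySem.List.pyRange_one_eq_nil]
  | cons a t ih =>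
    cases t with
    | nil => simp [altCount, PySem.List.pyRange_one_eq_nil]
    | cons b t2 =>
      have hlt : (0 : Int) < ((a :: b :: t2).length : Int) - 1 := by
        simp only [List.length_cons]; omega
      rw [PySem.List.pyRange_one_cons hlt]
      simp only [List.map_cons, List.sum_cons, zero_add]
      have hshift :
          (PySem.List.pyRange 1 (((a :: b :: t2).length : Int) - 1) 1).map
            (fun i => if k (PySem.List.pyGetD (a :: b :: t2) i "") ≠ k (PySem.List.pyGetD (a :: b :: t2) (i + 1) "") then (1 : Int) else 0)
          = (PySem.List.pyRange 0 (((b :: t2).length : Int) - 1) 1).map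
            (fun i => if k (PySem.List.pyGetD (b :: t2) i "") ≠ k (PySem.List.pyGetD (b :: t2) (i + 1) "") then (1 : Int) else 0) := by
        rw [PySem.List.pyRange_one, PySem.List.pyRange_one]
        have hlen : (((a :: b :: t2).length : Int) - 1 - 1).toNat = (((b :: t2).length : Int) - 1 - 0).toNat := by
          simp only [List.length_cons]; omega
        rw [hlen]
        simp only [List.map_map]
        apply List.map_congr_left
        intro j hj
        have h1 : PySem.List.pyGetD (a :: b :: t2) (1 + (j : Int)) "" = PySem.List.pyGetD (b :: t2) (0 + (j : Int)) "" := by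
          rw [PySem.List.pyGetD_of_nonneg _ _ (by omega), PySem.List.pyGetD_of_nonneg _ _ (by omega)]
          have h : ((1 : Int) + (j : Int)).toNat = ((0 : Int) + (j : Int)).toNat + 1 := by omega
          rw [h]; simp [List.getD]
        have h2 : PySem.List.pyGetD (a :: b :: t2) (1 + (j : Int) + 1) "" = PySem.List.pyGetD (b :: t2) (0 + (j : Int) + 1) "" := by
          rw [PySem.List.pyGetD_of_nonneg _ _ (by omega), PySem.List.pyGetD_of_nonneg _ _ (by omega)]
          have h : ((1 : Int) + (j : Int) + 1).toNat = ((0 : Int) + (j : Int) + 1).toNat + 1 := by omega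
          rw [h]; simp [List.getD]
        simp only [Function.comp, h1, h2]
      rw [hshift, ih]
      have h0 : PySem.List.pyGetD (a :: b :: t2) 0 "" = a := PySem.List.pyGetD_zero_cons _ _ _
      have h1 : PySem.List.pyGetD (a :: b :: t2) (1 : Int) "" = b := by
        rw [PySem.List.pyGetD_of_nonneg _ _ (by omega)]; rfl
      rw [h0, h1]
      simp [altCount]

/-- A's indexed loop computes altCount of the membership sequence. -/
theorem foldA_eq (k : String → Bool) (L : List String) :
    (PySem.List.pyRange 0 ((L.length : Int) - 1) 1).foldl
      (fun acc i =>
        if k (PySem.List.pyGetD L i "") ≠ k (PySem.List.pyGetD L (i + 1) "") then acc + 1 else acc) 0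
    = altCount (L.map k) := by
  have hbody : (fun (acc : Int) (i : Int) =>
      if k (PySem.List.pyGetD L i "") ≠ k (PySem.List.pyGetD L (i + 1) "") then acc + 1 else acc)
      = (fun (acc : Int) (i : Int) =>
      acc + (if k (PySem.List.pyGetD L i "") ≠ k (PySem.List.pyGetD L (i + 1) "") then 1 else 0)) := by
    funext acc i; split_ifs <;> omega
  rw [hbody, PySem.List.foldl_add, zero_add, sumInd_eq]

/-- invariant of B's run-compression fold -/
theorem foldB_inv (k : String → Bool) :
    ∀ (t : List String) (r : List Bool) (p : Bool), r ≠ [] → r.getLast? = some p →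
      ((t.foldl (fun runs s =>
          if runs.isEmpty || (PySem.List.pyGetD runs (-1) false != k s) then runs ++ [k s] else runs) r).length : Int)
        = (r.length : Int) + altCount (p :: t.map k) := by
  intro t
  induction t with
  | nil => intro r p _ _; simp [altCount]
  | cons s t ih =>
    intro r p hr hlast
    simp only [List.foldl_cons]
    have hE : r.isEmpty = false := by simpa [List.isEmpty_iff] using hr
    have hlastv : PySem.List.pyGetD r (-1) false = p := by
      rw [PySem.List.pyGetD_neg_one r false hr]
      rw [List.getLast?_eq_some_getLast hr] at hlast; exact Option.some.inj hlast
    by_cases hk : k s = p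
    · have hcond : (r.isEmpty || (PySem.List.pyGetD r (-1) false != k s)) = false := by
        simp [hE, hlastv, hk]
      rw [hcond]
      simp only [Bool.false_eq_true, if_false]
      rw [ih r p hr hlast]
      simp [altCount, hk]
    · have hcond : (r.isEmpty || (PySem.List.pyGetD r (-1) false != k s)) = true := by
        simp [hE, hlastv]; exact fun h => (hk h.symm).elim
      rw [if_pos hcond]
      rw [ih (r ++ [k s]) (k s) (by simp) (by simp)]
      simp [altCount, Ne.symm hk]
      omega

/-- B computes altCount too. -/
theorem altB (k : String → Bool) (L : List String) :
    (((L.foldl (fun runs s =>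
        if runs.isEmpty || (PySem.List.pyGetD runs (-1) false != k s) then runs ++ [k s] else runs)
        ([] : List Bool)).length : Int))
      = if L = [] then 0 else 1 + altCount (L.map k) := by
  cases L with
  | nil => simp
  | cons s t =>
    simp only [List.foldl_cons, List.isEmpty_nil, Bool.true_or, if_pos, List.nil_append]
    rw [foldB_inv k t [k s] (k s) (by simp) (by simp)]
    simp

-- ===== VERDICT (by name: the statement is the Claim_ definition above) =====
theorem calculate_alternances_spec : Claim_equal_calculate_alternances := by
  intro combination source_array _
  unfold Spec_calculate_alternances calculate_alternances calculate_alternances_alt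
  set k : String → Bool := fun s => PySem.Set.contains (PySem.Set.ofList (combination.map PySem.Int.toStr)) s with hk
  simp only []
  rw [altB k source_array]
  by_cases h : source_array = []
  · simp [h]
  · rw [if_neg h, if_neg h, foldA_eq k source_array]
    have := altCount_nonneg (source_array.map k)
    omega
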